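-- pv_equiv track=rewrite | github.com/dcn-autotest-team/waffirm | autoTests/performance_test/performance_main_oneap.py | ClassifyTestCase
-- ===== SOURCE A (Python) =====
-- def ClassifyTestCase(Tlist):
--     '''
--     功能：根据用例名称对用例进行分类：
--     名称后缀带_ALL代表集中转发、本地转发、2.4G、5G都需要执行；
--     名称后缀带_ONE代表与集中转发、本地转发、2.4G、5G无关，此类用例在整个执行过程中只会执行一遍
--     名称后缀带_CEN代表集中转发（包括2.4G和5G）需要执行；
--     名称后缀带_LOC代表本地转发（包括2.4G和5G）需要执行；
--     名称后缀带_24G代表2.4G需要执行（包括集中转发和本地转发）；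
--     名称后缀带_5G代表5G需要执行（包括集中转发和本地转发）；
--     参数：Tlist，由所有测试例名称构成的测试列表，由run文件自动生成
--     返回值：分类后的测试用例字典，key为类别，如ALL、ONE等，值为属于该类的测试用例列表
--     '''
--     ret = {'ALL':[],
--             'ONE':[],
--             'CEN':[],
--             'LOC':[],
--             '24G':[],
--             '5G':[],
--             'C24G':[],
--             'C5G':[],
--             'L24G':[],
--             'L5G':[]}
--     for testcase in Tlist:
--         if '_ALL' in testcase[0]:
--             ret['ALL'].append(testcase)
--         elif '_ONE' in testcase[0]:
--             ret['ONE'].append(testcase)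
--         elif '_CEN' in testcase[0]:
--             ret['CEN'].append(testcase)
--         elif '_LOC' in testcase[0]:
--             ret['LOC'].append(testcase)
--         elif '_24G' in testcase[0]:
--             ret['24G'].append(testcase)
--         elif '_5G' in testcase[0]:
--             ret['5G'].append(testcase)
--         elif '_C24G' in testcase[0]:
--             ret['C24G'].append(testcase)
--         elif '_C5G' in testcase[0]:
--             ret['C5G'].append(testcase)
--         elif '_L24G' in testcase[0]:
--             ret['L24G'].append(testcase)
--         elif '_L5G' in testcase[0]:
--             ret['L5G'].append(testcase)
--         else:
--             ret['ALL'].append(testcase)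
--     return ret
-- ===== SOURCE B (Python) =====
-- _PATTERNS = [('_ALL', 'ALL'), ('_ONE', 'ONE'), ('_CEN', 'CEN'), ('_LOC', 'LOC'),
--              ('_24G', '24G'), ('_5G', '5G'), ('_C24G', 'C24G'), ('_C5G', 'C5G'),
--              ('_L24G', 'L24G'), ('_L5G', 'L5G')]
-- _KEYS = [cat for _, cat in _PATTERNS]
--
--
-- def _category(name):
--     return next((cat for pat, cat in _PATTERNS if pat in name), 'ALL')
--
--
-- def ClassifyTestCase(Tlist):
--     return {key: [tc for tc in Tlist if _category(tc[0]) == key] for key in _KEYS}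
-- ===== Notes on version B (the rewrite author's own statement) =====
-- stated objective: simpler
-- what changed: Replaces the ten-branch if-elif ladder with an ordered (substring, category) table scanned for the first match, and builds the result as one dict comprehension filtering per category instead of appending inside a branch ladder.
import Mathlib
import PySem

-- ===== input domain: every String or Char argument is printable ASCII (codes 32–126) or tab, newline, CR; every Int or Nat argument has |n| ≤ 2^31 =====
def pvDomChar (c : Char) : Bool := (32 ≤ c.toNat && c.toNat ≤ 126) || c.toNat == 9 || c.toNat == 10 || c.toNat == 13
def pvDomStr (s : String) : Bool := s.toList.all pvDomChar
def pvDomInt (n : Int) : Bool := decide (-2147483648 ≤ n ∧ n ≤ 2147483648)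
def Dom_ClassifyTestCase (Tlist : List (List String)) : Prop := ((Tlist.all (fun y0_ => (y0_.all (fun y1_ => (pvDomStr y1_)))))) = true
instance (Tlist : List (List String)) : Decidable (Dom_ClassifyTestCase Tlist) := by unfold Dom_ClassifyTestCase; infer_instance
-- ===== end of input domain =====

-- B replaces A's ten-branch if-elif ladder with an ordered (substring, category) table
-- scanned for the first match, and builds the result by one filter per category (simpler, not faster).

-- ===== PORT A =====
-- testcase[0] (raises IndexError on an empty inner list; Pre_ excludes those inputs)
def pvName (tc : List String) : String := (PySem.List.pyGet? tc 0).getD ""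

def ClassifyTestCase (Tlist : List (List String)) : List (String × List (List String)) :=
  let ret : PySem.Dict String (List (List String)) :=
    PySem.Dict.mk [("ALL", []), ("ONE", []), ("CEN", []), ("LOC", []), ("24G", []),
                   ("5G", []), ("C24G", []), ("C5G", []), ("L24G", []), ("L5G", [])]
  (Tlist.foldl (fun ret tc =>
    let name := pvName tc
    if PySem.Str.isIn "_ALL" name then ret.modify "ALL" [] (· ++ [tc])
    else if PySem.Str.isIn "_ONE" name then ret.modify "ONE" [] (· ++ [tc])
    else if PySem.Str.isIn "_CEN" name then ret.modify "CEN" [] (· ++ [tc])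
    else if PySem.Str.isIn "_LOC" name then ret.modify "LOC" [] (· ++ [tc])
    else if PySem.Str.isIn "_24G" name then ret.modify "24G" [] (· ++ [tc])
    else if PySem.Str.isIn "_5G" name then ret.modify "5G" [] (· ++ [tc])
    else if PySem.Str.isIn "_C24G" name then ret.modify "C24G" [] (· ++ [tc])
    else if PySem.Str.isIn "_C5G" name then ret.modify "C5G" [] (· ++ [tc])
    else if PySem.Str.isIn "_L24G" name then ret.modify "L24G" [] (· ++ [tc])
    else if PySem.Str.isIn "_L5G" name then ret.modify "L5G" [] (· ++ [tc])
    else ret.modify "ALL" [] (· ++ [tc])) ret).items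

-- ===== PORT B =====
def pvPatterns : List (String × String) :=
  [("_ALL", "ALL"), ("_ONE", "ONE"), ("_CEN", "CEN"), ("_LOC", "LOC"), ("_24G", "24G"),
   ("_5G", "5G"), ("_C24G", "C24G"), ("_C5G", "C5G"), ("_L24G", "L24G"), ("_L5G", "L5G")]

def pvKeys : List String := pvPatterns.map (·.2)

def pvCategory (name : String) : String :=
  ((pvPatterns.find? (fun p => PySem.Str.isIn p.1 name)).map (·.2)).getD "ALL"

def ClassifyTestCase_alt (Tlist : List (List String)) : List (String × List (List String)) :=
  pvKeys.map (fun key => (key, Tlist.filter (fun tc => pvCategory (pvName tc) == key)))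

-- ===== PRECONDITION & SPEC =====
-- Pre_ excludes inputs containing an empty inner list: there A (and B) raises IndexError on testcase[0].
def Pre_ClassifyTestCase (Tlist : List (List String)) : Prop := ∀ t ∈ Tlist, t ≠ []
instance (Tlist : List (List String)) : Decidable (Pre_ClassifyTestCase Tlist) := by unfold Pre_ClassifyTestCase; infer_instance
def pvWitness_ClassifyTestCase : List (List String) := [["TC1_ALL"], ["TC2_5G", "x"], ["TC3"]]

def Spec_ClassifyTestCase (Tlist : List (List String)) (out : List (String × List (List String))) : Prop := out = ClassifyTestCase_alt Tlist
instance (Tlist : List (List String)) (out : List (String × List (List String))) : Decidable (Spec_ClassifyTestCase Tlist out) := by unfold Spec_ClassifyTestCase; infer_instance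

-- ===== CLAIM (what is proved, stated in full; the proofs are below) =====
def Claim_equal_ClassifyTestCase : Prop := ∀ (Tlist : List (List String)), Dom_ClassifyTestCase Tlist → Pre_ClassifyTestCase Tlist → Spec_ClassifyTestCase Tlist (ClassifyTestCase Tlist)

-- ===== LEMMAS AND PROOFS =====

-- A's branch ladder is one modify at the category B's table scan selects.
theorem pv_step_eq (d : PySem.Dict String (List (List String))) (tc : List String) :
    (if PySem.Str.isIn "_ALL" (pvName tc) then d.modify "ALL" [] (· ++ [tc])
    else if PySem.Str.isIn "_ONE" (pvName tc) then d.modify "ONE" [] (· ++ [tc])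
    else if PySem.Str.isIn "_CEN" (pvName tc) then d.modify "CEN" [] (· ++ [tc])
    else if PySem.Str.isIn "_LOC" (pvName tc) then d.modify "LOC" [] (· ++ [tc])
    else if PySem.Str.isIn "_24G" (pvName tc) then d.modify "24G" [] (· ++ [tc])
    else if PySem.Str.isIn "_5G" (pvName tc) then d.modify "5G" [] (· ++ [tc])
    else if PySem.Str.isIn "_C24G" (pvName tc) then d.modify "C24G" [] (· ++ [tc])
    else if PySem.Str.isIn "_C5G" (pvName tc) then d.modify "C5G" [] (· ++ [tc])
    else if PySem.Str.isIn "_L24G" (pvName tc) then d.modify "L24G" [] (· ++ [tc])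
    else if PySem.Str.isIn "_L5G" (pvName tc) then d.modify "L5G" [] (· ++ [tc])
    else d.modify "ALL" [] (· ++ [tc])) =
      d.modify (pvCategory (pvName tc)) [] (· ++ [tc]) := by
  unfold pvCategory pvPatterns
  simp only [List.find?]
  split_ifs <;> simp_all

theorem pv_cat_mem (n : String) : pvCategory n ∈ pvKeys := by
  unfold pvCategory pvKeys
  cases h : pvPatterns.find? (fun p => PySem.Str.isIn p.1 n) with
  | none => simp only [Option.map_none, Option.getD_none]; decide
  | some pr =>
      simp only [Option.map_some, Option.getD_some]
      exact List.mem_map_of_mem (List.mem_of_find?_eq_some h)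

theorem ClassifyTestCase_spec : Claim_equal_ClassifyTestCase := by
  intro Tlist _ _
  unfold Spec_ClassifyTestCase ClassifyTestCase ClassifyTestCase_alt
  simp only [pv_step_eq]
  have hfm : ∀ (init : PySem.Dict String (List (List String))),
      Tlist.foldl (fun d tc => d.modify (pvCategory (pvName tc)) [] (· ++ [tc])) init
        = (Tlist.map (fun tc => (pvCategory (pvName tc), tc))).foldl
            (fun d p => d.modify p.1 [] (· ++ [p.2])) init := by
    intro init; rw [List.foldl_map]
  rw [hfm]
  set l := Tlist.map (fun tc => (pvCategory (pvName tc), tc)) with hl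
  have hnd0 : (PySem.Dict.mk [("ALL", ([] : List (List String))), ("ONE", []), ("CEN", []), ("LOC", []), ("24G", []),
      ("5G", []), ("C24G", []), ("C5G", []), ("L24G", []), ("L5G", [])]).keys.Nodup := by decide
  have hnd : (l.foldl (fun d p => d.modify p.1 [] (· ++ [p.2]))
      (PySem.Dict.mk [("ALL", []), ("ONE", []), ("CEN", []), ("LOC", []), ("24G", []),
        ("5G", []), ("C24G", []), ("C5G", []), ("L24G", []), ("L5G", [])])).keys.Nodup := by
    exact PySem.Dict.nodup_keys_foldl_modify_key l Prod.fst [] _ _ hnd0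
  rw [PySem.Dict.items_eq_map_keys _ hnd []]
  have hkeys : (l.foldl (fun d p => d.modify p.1 [] (· ++ [p.2]))
      (PySem.Dict.mk [("ALL", []), ("ONE", []), ("CEN", []), ("LOC", []), ("24G", []),
        ("5G", []), ("C24G", []), ("C5G", []), ("L24G", []), ("L5G", [])])).keys = pvKeys := by
    have hkd : (PySem.Dict.mk [("ALL", ([] : List (List String))), ("ONE", []), ("CEN", []), ("LOC", []), ("24G", []),
        ("5G", []), ("C24G", []), ("C5G", []), ("L24G", []), ("L5G", [])]).keys = pvKeys := by decide
    have hsub : ∀ x ∈ PySem.Set.ofList (l.map Prod.fst), x ∈ pvKeys := by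
      intro x hx
      rw [PySem.Set.mem_ofList] at hx
      obtain ⟨p, hp, rfl⟩ := List.mem_map.1 hx
      rw [hl] at hp
      obtain ⟨tc, _, rfl⟩ := List.mem_map.1 hp
      exact pv_cat_mem (pvName tc)
    rw [PySem.Dict.keys_foldl_modify_key, hkd, PySem.Set.update_eq_append_filter]
    rw [List.filter_eq_nil_iff.2 ?_, List.append_nil]
    intro x hx
    simpa using hsub x hx
  rw [hkeys]
  apply List.map_congr_left
  intro k hk
  refine Prod.ext rfl ?_
  simp only
  rw [PySem.Dict.getD_foldl_modify_append, hl]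
  have hd0 : (PySem.Dict.mk [("ALL", ([] : List (List String))), ("ONE", []), ("CEN", []), ("LOC", []), ("24G", []),
      ("5G", []), ("C24G", []), ("C5G", []), ("L24G", []), ("L5G", [])]).getD k [] = [] := by
    revert hk; unfold pvKeys pvPatterns
    intro hk
    fin_cases hk <;> decide
  rw [hd0, List.nil_append, List.filter_map, List.map_map]
  simp [Function.comp_def]
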